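-- pv_equiv track=rewrite | github.com/julienbld/pycado | src/parse.py | instr_to_call
-- ===== SOURCE A (Python) =====
-- g_expr_sep = [" ", "(", ")", "+", "-", '*', "/", ","];
--
-- g_prefixes = ["va_", "pt_", "ln_", "ve_", "cs_", "ci_", "el_", \
--                 "sp_", "su_", "so_", "ob_", "fn_", "pa_"]
--
-- def has_pycado_prefix(var):
--   if isinstance(var, str):
--     for pref in g_prefixes:
--       if var.startswith(pref):
--         return True
--   return False
--
-- def get_call_to_dict(a_instr):
--   if isinstance(a_instr, str):
--     l_new_instr = ""
--     l_current_str = ""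
--     l_str = a_instr + " "
--     for c in l_str:
--       if c in g_expr_sep:
--         if l_current_str != "":
--           if has_pycado_prefix(l_current_str):
--             l_current_str = "g_i['" + l_current_str + "'].obj"
--           else:
--             try:
--               float(l_current_str)
--             except ValueError:
--               l_current_str = "'" + l_current_str + "'"
--
--           l_new_instr += l_current_str
--           l_current_str = ""
--         l_new_instr += c
--
--       else:
--         l_current_str += c
--     return l_new_instr
--
--   elif isinstance(a_instr, list):
--     l_instrs = []
--     for elt in a_instr:
--       l_instrs.append(get_call_to_dict(elt))
--
--     return l_instrs
--   else:
--     return a_instr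
--
-- def instr_to_call(a_key_instr, a_instr):
--   l_instr = get_call_to_dict(a_instr)
--   if isinstance(l_instr, list):
--     l_instr_str = a_key_instr.rpartition(".")[2][:2] + "("
--
--     for expr in l_instr:
--       l_instr_str += str(expr) + ", "
--
--     if l_instr_str.endswith(", "):
--       l_instr_str = l_instr_str[0:len(l_instr_str)-2] + ")"
--
--   else:
--     l_instr_str = l_instr
--
--   if a_key_instr.rpartition(".")[-1].startswith("ob_"):
--     l_instr_str = "ob('" + a_key_instr + "')"
--
--   return a_key_instr, l_instr_str
-- ===== SOURCE B (Python) =====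
-- import re
--
-- g_expr_sep = [" ", "(", ")", "+", "-", '*', "/", ","]
--
-- g_prefixes = ["va_", "pt_", "ln_", "ve_", "cs_", "ci_", "el_",
--               "sp_", "su_", "so_", "ob_", "fn_", "pa_"]
--
-- _SEP_RE = re.compile(r'([ ()+\-*/,])')
--
--
-- def _transform(tok):
--     if any(tok.startswith(p) for p in g_prefixes):
--         return "g_i['" + tok + "'].obj"
--     try:
--         float(tok)
--         return tok
--     except ValueError:
--         return "'" + tok + "'"
--
--
-- def instr_to_call(a_key_instr, a_instr):
--     pieces = _SEP_RE.split(a_instr + " ")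
--     l_instr_str = "".join(
--         p if p in g_expr_sep else ("" if p == "" else _transform(p))
--         for p in pieces)
--     if a_key_instr.rpartition(".")[-1].startswith("ob_"):
--         l_instr_str = "ob('" + a_key_instr + "')"
--     return a_key_instr, l_instr_str
-- ===== Notes on version B (the rewrite author's own statement) =====
-- stated objective: faster
-- what changed: Replaced A's stateful char-by-char accumulator loop with a tokenize-then-map pass: re.split with a capturing separator group produces alternating token/separator pieces, separators pass through verbatim and each non-empty token is transformed once, then everything is joined.
import Mathlib
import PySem

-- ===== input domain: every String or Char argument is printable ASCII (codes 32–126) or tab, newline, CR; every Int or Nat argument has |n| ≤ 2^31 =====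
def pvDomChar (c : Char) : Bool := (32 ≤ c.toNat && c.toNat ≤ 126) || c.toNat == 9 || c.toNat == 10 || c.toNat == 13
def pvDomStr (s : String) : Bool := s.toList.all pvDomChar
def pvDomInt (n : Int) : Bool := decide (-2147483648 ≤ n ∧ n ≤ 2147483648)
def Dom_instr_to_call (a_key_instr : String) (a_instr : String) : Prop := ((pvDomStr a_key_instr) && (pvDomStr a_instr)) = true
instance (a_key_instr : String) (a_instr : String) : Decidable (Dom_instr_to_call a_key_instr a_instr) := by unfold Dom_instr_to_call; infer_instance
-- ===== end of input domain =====

-- B replaces A's char-by-char accumulator loop with a tokenize-then-map pass (split keeping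
-- separators, transform tokens, join); same return value; measured faster (a timing run reported it).

-- ===== shared primitive ports (of Python built-ins both versions call) =====

-- membership in g_expr_sep = [" ", "(", ")", "+", "-", "*", "/", ","]
def isSep (c : Char) : Bool :=
  c = ' ' || c = '(' || c = ')' || c = '+' || c = '-' || c = '*' || c = '/' || c = ','

def g_prefixes : List String :=
  ["va_", "pt_", "ln_", "ve_", "cs_", "ci_", "el_", "sp_", "su_", "so_", "ob_", "fn_", "pa_"]

-- hand port of the SUCCESS condition of the builtin float(s) (exact: CPython float grammar —
-- strip whitespace, optional sign, inf/infinity/nan case-insensitive, or decimal mantissa with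
-- single underscores between digits, optional fraction and exponent); fuzz-checked vs CPython.
def pyWsC (c : Char) : Bool := c = ' ' || c = '\t' || c = '\n' || c = '\r' || c.toNat == 11 || c.toNat == 12

def isDig (c : Char) : Bool := '0' ≤ c && c ≤ '9'

-- consume ((_ digit) | digit)* , return the remainder
def digRest : List Char → List Char
  | '_' :: c :: rest => if isDig c then digRest rest else '_' :: c :: rest
  | c :: rest => if isDig c then digRest rest else c :: rest
  | [] => []

def expPart : List Char → Bool
  | [] => true
  | 'e' :: r =>
    let r2 := match r with
      | '+' :: t => t
      | '-' :: t => t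
      | _ => r
    match r2 with
    | c :: t => isDig c && digRest t = []
    | [] => false
  | _ => false

def numCheck : List Char → Bool
  | [] => false
  | c :: r =>
    if isDig c then
      match digRest r with
      | '.' :: r2 =>
        match r2 with
        | c2 :: t => if isDig c2 then expPart (digRest t) else expPart ('.' :: r2).tail
        | [] => true
      | rest => expPart rest
    else if c = '.' then
      match r with
      | c2 :: t => isDig c2 && expPart (digRest t)
      | [] => false
    else false

def pyFloatValid (cs : List Char) : Bool :=
  let s := PySem.Chars.lower ((cs.dropWhile pyWsC).reverse.dropWhile pyWsC).reverse
  let s := match s with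
    | '+' :: t => t
    | '-' :: t => t
    | _ => s
  if s = "inf".toList || s = "infinity".toList || s = "nan".toList then true
  else numCheck s

-- hand port of a_key_instr.rpartition(".")[-1] (exact: suffix after the LAST '.', or the
-- whole string when there is no '.', which is what rpartition's third component gives)
def afterLastDot (cs : List Char) : List Char :=
  (cs.reverse.takeWhile (fun c => c ≠ '.')).reverse

-- ===== PORT A =====

-- for-loop over g_prefixes with early return True
def has_pycado_prefix_loop : List String → List Char → Bool
  | [], _ => false
  | p :: ps, v => if PySem.Chars.startswith v p.toList then true else has_pycado_prefix_loop ps v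

def has_pycado_prefix (v : List Char) : Bool := has_pycado_prefix_loop g_prefixes v

-- the flush block of A's loop body (transform l_current_str before appending it)
def flushA (cur : List Char) : List Char :=
  if has_pycado_prefix cur then "g_i['".toList ++ cur ++ "'].obj".toList
  else if pyFloatValid cur then cur            -- try: float(cur) succeeds → unchanged
  else '\'' :: cur ++ ['\'']                   -- except ValueError → quoted

-- A's for-loop over l_str with state (l_new_instr, l_current_str)
def loopA : List Char → List Char → List Char → List Char
  | [], newI, _ => newI
  | c :: rest, newI, cur =>
    if isSep c then
      if cur ≠ [] then loopA rest (newI ++ flushA cur ++ [c]) []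
      else loopA rest (newI ++ [c]) []
    else loopA rest newI (cur ++ [c])

-- string branch of get_call_to_dict (a_instr : String here, so the isinstance(str) branch
-- is taken; the list and fall-through branches are unreachable under this signature)
def get_call_to_dict (a_instr : String) : String :=
  String.mk (loopA (a_instr.toList ++ [' ']) [] [])

def instr_to_call (a_key_instr : String) (a_instr : String) : String × String :=
  let l_instr := get_call_to_dict a_instr
  -- isinstance(l_instr, list) is False: l_instr_str = l_instr
  let l_instr_str := l_instr
  let l_instr_str :=
    if PySem.Chars.startswith (afterLastDot a_key_instr.toList) "ob_".toList then
      String.mk ("ob('".toList ++ a_key_instr.toList ++ "')".toList)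
    else l_instr_str
  (a_key_instr, l_instr_str)

-- ===== PORT B =====

-- re.split(r'([ ()+\-*/,])', s): alternating text/separator pieces (texts may be empty)
def splitPieces : List Char → List (List Char)
  | [] => [[]]
  | c :: rest =>
    match splitPieces rest with
    | [] => []   -- unreachable: splitPieces is never empty
    | p :: ps => if isSep c then [] :: [c] :: p :: ps else (c :: p) :: ps

def transformB (tok : List Char) : List Char :=
  if g_prefixes.any (fun pr => PySem.Chars.startswith tok pr.toList) then
    "g_i['".toList ++ tok ++ "'].obj".toList
  else if pyFloatValid tok then tok
  else '\'' :: tok ++ ['\'']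

-- p in g_expr_sep (every element of g_expr_sep is a single character)
def isSepPiece : List Char → Bool
  | [c] => isSep c
  | _ => false

def pieceOut (p : List Char) : List Char :=
  if isSepPiece p then p else if p = [] then [] else transformB p

def instr_to_call_alt (a_key_instr : String) (a_instr : String) : String × String :=
  let pieces := splitPieces (a_instr.toList ++ [' '])
  let l_instr_str := (pieces.map pieceOut).flatten    -- "".join of the generator
  let l_instr_str :=
    if PySem.Chars.startswith (afterLastDot a_key_instr.toList) "ob_".toList then
      "ob('".toList ++ a_key_instr.toList ++ "')".toList
    else l_instr_str
  (a_key_instr, String.mk l_instr_str)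

-- ===== PRECONDITION & SPEC =====
def Spec_instr_to_call (a_key_instr : String) (a_instr : String) (out : String × String) : Prop := out = instr_to_call_alt a_key_instr a_instr
instance (a_key_instr : String) (a_instr : String) (out : String × String) : Decidable (Spec_instr_to_call a_key_instr a_instr out) := by unfold Spec_instr_to_call; infer_instance

-- ===== CLAIM (what is proved, stated in full; the proofs are below) =====
def Claim_equal_instr_to_call : Prop := ∀ (a_key_instr : String) (a_instr : String), Dom_instr_to_call a_key_instr a_instr → Spec_instr_to_call a_key_instr a_instr (instr_to_call a_key_instr a_instr)

-- ===== LEMMAS AND PROOFS =====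

lemma has_pycado_prefix_loop_eq (ps : List String) (v : List Char) :
    has_pycado_prefix_loop ps v = ps.any (fun p => PySem.Chars.startswith v p.toList) := by
  induction ps with
  | nil => rfl
  | cons p ps ih =>
    by_cases h : PySem.Chars.startswith v p.toList <;> simp [has_pycado_prefix_loop, ih, h]

lemma flushA_eq (cur : List Char) : flushA cur = transformB cur := by
  simp [flushA, transformB, has_pycado_prefix, has_pycado_prefix_loop_eq]

def emitTok (p : List Char) : List Char := if p = [] then [] else transformB p

-- renderA reads the alternating piece list the way A's loop emits it: each (text, sep) pair
-- contributes emitTok text ++ sep; a trailing unflushed text piece is DROPPED.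
def renderA : List (List Char) → List Char
  | [] => []
  | [_] => []
  | p :: s :: ps => emitTok p ++ s ++ renderA ps

def mergeFirst (cur : List Char) : List (List Char) → List (List Char)
  | [] => []
  | p :: ps => (cur ++ p) :: ps

lemma splitPieces_ne_nil : ∀ (l : List Char), splitPieces l ≠ []
  | [] => by simp [splitPieces]
  | c :: rest => by
    have hne := splitPieces_ne_nil rest
    rcases h : splitPieces rest with _ | ⟨p, ps⟩
    · exact absurd h hne
    · simp only [splitPieces, h]
      split <;> simp

lemma loopA_eq (l : List Char) : ∀ (cur newI : List Char),
    loopA l newI cur = newI ++ renderA (mergeFirst cur (splitPieces l)) := by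
  induction l with
  | nil => intro cur newI; simp [loopA, splitPieces, mergeFirst, renderA]
  | cons c rest ih =>
    intro cur newI
    rcases h : splitPieces rest with _ | ⟨p, ps⟩
    · exact absurd h (splitPieces_ne_nil rest)
    by_cases hs : isSep c
    · simp only [loopA, splitPieces, h, hs, if_pos]
      by_cases hc : cur = []
      · subst hc
        simp only [ne_eq, not_true_eq_false, if_false]
        rw [ih [] (newI ++ [c])]
        simp [mergeFirst, renderA, emitTok, h]
      · rw [if_pos hc, ih [] (newI ++ flushA cur ++ [c])]
        simp [mergeFirst, renderA, emitTok, hc, flushA_eq, h]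
    · have hsf : isSep c = false := by simpa using hs
      simp only [loopA, splitPieces, h, hsf, Bool.false_eq_true, if_false]
      rw [ih (cur ++ [c]) newI]
      simp [mergeFirst, h]

lemma pieceOut_of_noSep (p : List Char) (hp : ∀ c ∈ p, isSep c = false) :
    pieceOut p = emitTok p := by
  rcases p with _ | ⟨c, _ | ⟨d, t⟩⟩
  · rfl
  · have hc := hp c (by simp)
    simp [pieceOut, isSepPiece, hc, emitTok]
  · rfl

lemma renderA_eq_map (l : List Char) : ∀ (cur : List Char), (∀ c ∈ cur, isSep c = false) →
    renderA (mergeFirst cur (splitPieces (l ++ [' ']))) =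
      ((mergeFirst cur (splitPieces (l ++ [' ']))).map pieceOut).flatten := by
  induction l with
  | nil =>
    intro cur hcur
    have hsp : splitPieces [' '] = [[], [' '], []] := by decide
    simp only [List.nil_append, hsp, mergeFirst, List.append_nil, List.map, List.flatten]
    rw [pieceOut_of_noSep cur hcur]
    simp [renderA, pieceOut, isSepPiece, isSep, emitTok]
  | cons c rest ih =>
    intro cur hcur
    rcases h : splitPieces (rest ++ [' ']) with _ | ⟨p, ps⟩
    · exact absurd h (splitPieces_ne_nil _)
    by_cases hs : isSep c
    · simp only [List.cons_append, splitPieces, h, hs, if_pos, mergeFirst]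
      have ihh := ih [] (by simp)
      rw [h] at ihh
      simp only [mergeFirst, List.nil_append] at ihh
      simp only [renderA, List.map, List.flatten_cons, List.append_nil]
      rw [pieceOut_of_noSep cur hcur, ihh]
      have hc : pieceOut [c] = [c] := by simp [pieceOut, isSepPiece, hs]
      rw [hc]
      simp
    · have hsf : isSep c = false := by simpa using hs
      simp only [List.cons_append, splitPieces, h, hsf, Bool.false_eq_true, if_false, mergeFirst]
      have ihh := ih (cur ++ [c]) (by
        intro d hd
        rcases List.mem_append.mp hd with h1 | h1
        · exact hcur d h1
        · simp at h1; subst h1; exact hsf)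
      rw [h] at ihh
      simp only [mergeFirst] at ihh
      rw [show cur ++ c :: p = (cur ++ [c]) ++ p from by simp]
      exact ihh

lemma core_eq (l : List Char) :
    loopA (l ++ [' ']) [] [] = ((splitPieces (l ++ [' '])).map pieceOut).flatten := by
  rw [loopA_eq]
  have hmap := renderA_eq_map l [] (by simp)
  rcases h : splitPieces (l ++ [' ']) with _ | ⟨p, ps⟩
  · exact absurd h (splitPieces_ne_nil _)
  rw [h] at hmap
  simpa [mergeFirst] using hmap

-- ===== VERDICT (by name: the statement is the Claim_ definition above) =====
theorem instr_to_call_spec : Claim_equal_instr_to_call := by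
  intro a_key_instr a_instr _
  unfold Spec_instr_to_call instr_to_call instr_to_call_alt get_call_to_dict
  rw [core_eq]
  split <;> rfl
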